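-- pv_equiv track=rewrite | github.com/odoucet/aubergeRP | aubergeRP/services/chat_service.py | _split_roleplay_bracket_segments
-- ===== SOURCE A (Python) =====
-- def _split_roleplay_bracket_segments(text: str) -> tuple[list[str], list[str]]:
--     """Split user text into dialogue fragments and bracketed instructions."""
--     dialogue_parts: list[str] = []
--     instructions: list[str] = []
--
--     dialogue_buf: list[str] = []
--     instruction_buf: list[str] = []
--     opening = ""
--     closing = ""
--
--     for char in text:
--         if not opening:
--             if char in "[{":
--                 if dialogue_buf:
--                     dialogue_parts.append("".join(dialogue_buf))
--                     dialogue_buf = []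
--                 opening = char
--                 closing = "]" if char == "[" else "}"
--             else:
--                 dialogue_buf.append(char)
--         else:
--             if char == closing:
--                 segment = "".join(instruction_buf).strip()
--                 if segment:
--                     instructions.append(segment)
--                 instruction_buf = []
--                 opening = ""
--                 closing = ""
--             else:
--                 instruction_buf.append(char)
--
--     if opening:
--         dialogue_buf.extend(opening)
--         dialogue_buf.extend(instruction_buf)
--
--     if dialogue_buf:
--         dialogue_parts.append("".join(dialogue_buf))
--
--     return dialogue_parts, instructions
-- ===== SOURCE B (Python) =====
-- def _split_roleplay_bracket_segments(text: str) -> tuple[list[str], list[str]]: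
--     """Split user text into dialogue fragments and bracketed instructions."""
--
--     def go(s):
--         for k, c in enumerate(s):
--             if c == "[" or c == "{":
--                 head = [s[:k]] if k else []
--                 closing = "]" if c == "[" else "}"
--                 j = s.find(closing, k + 1)
--                 if j == -1:
--                     return head + [s[k:]], []
--                 tail_d, tail_i = go(s[j + 1:])
--                 seg = s[k + 1:j].strip()
--                 return head + tail_d, ([seg] if seg else []) + tail_i
--         return ([s] if s else []), []
--
--     return go(text)
-- ===== Notes on version B (the rewrite author's own statement) =====
-- stated objective: alternative
-- what changed: Replaced A's per-character state machine (opening/closing flags with dialogue and instruction buffers) by a recursive slice-and-find decomposition: jump to the next bracket with a first-match scan, locate its closer with str.find, cut out the three slices and recurse on the remainder.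
import Mathlib
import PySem

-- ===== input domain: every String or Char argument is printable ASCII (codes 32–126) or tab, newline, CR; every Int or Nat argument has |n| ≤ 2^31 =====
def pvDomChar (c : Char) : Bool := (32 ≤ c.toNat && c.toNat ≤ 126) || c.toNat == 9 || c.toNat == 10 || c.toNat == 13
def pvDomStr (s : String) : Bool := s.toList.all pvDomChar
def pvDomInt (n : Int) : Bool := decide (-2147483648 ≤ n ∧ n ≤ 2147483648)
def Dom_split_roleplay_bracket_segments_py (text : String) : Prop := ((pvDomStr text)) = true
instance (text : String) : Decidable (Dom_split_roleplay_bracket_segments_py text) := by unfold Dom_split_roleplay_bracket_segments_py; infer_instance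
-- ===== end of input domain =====

-- B replaces A's per-character opening/closing state machine by a recursive slice-and-find
-- decomposition (jump to the next bracket, find its matching closer, recurse on the remainder);
-- objective: alternative decomposition, same asymptotic cost.

-- ===== PORT A =====
-- A's loop state: (dialogue_parts, instructions, dialogue_buf, instruction_buf, opening, closing);
-- the one-char Python strings opening/closing are List Char ("" = []).
structure PvStA where
  dp : List String
  ins : List String
  dbuf : List Char
  ibuf : List Char
  opening : List Char
  closing : List Char
deriving Repr, DecidableEq

def pvStepA (st : PvStA) (c : Char) : PvStA :=
  if st.opening.isEmpty then
    if c = '[' ∨ c = '{' then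
      let st' := if st.dbuf.isEmpty then st else { st with dp := st.dp ++ [String.ofList st.dbuf], dbuf := [] }
      { st' with opening := [c], closing := if c = '[' then [']'] else ['}'] }
    else
      { st with dbuf := st.dbuf ++ [c] }
  else
    if [c] = st.closing then
      let seg := PySem.Chars.strip st.ibuf
      { st with ins := if seg.isEmpty then st.ins else st.ins ++ [String.ofList seg],
                ibuf := [], opening := [], closing := [] }
    else
      { st with ibuf := st.ibuf ++ [c] }

def pvFinishA (st : PvStA) : List String × List String :=
  let dbuf := if st.opening.isEmpty then st.dbuf else st.dbuf ++ st.opening ++ st.ibuf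
  let dp := if dbuf.isEmpty then st.dp else st.dp ++ [String.ofList dbuf]
  (dp, st.ins)

def split_roleplay_bracket_segments_py (text : String) : List String × List String :=
  pvFinishA (text.toList.foldl pvStepA ⟨[], [], [], [], [], []⟩)

-- ===== PORT B =====
-- goB transliterates Source B's `go`: the `for k, c in enumerate(s): if c in "[{"` first-match scan
-- is List.findIdx?, s.find(closing, k+1) is PySem.Chars.findFrom, slices are PySem.List.slice.
def pvGoB (s : List Char) : List String × List String :=
  match hk : s.findIdx? (fun c => c == '[' || c == '{') with
  | none => (if s.isEmpty then [] else [String.ofList s], [])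
  | some k =>
    let head : List String := if k == 0 then [] else [String.ofList (PySem.List.slice s none (some (k : Int)))]
    let c := s.getD k ' '
    let closing : Char := if c = '[' then ']' else '}'
    let j : Int := PySem.Chars.findFrom s [closing] ((k : Int) + 1) none
    if j = -1 then
      (head ++ [String.ofList (PySem.List.slice s (some (k : Int)) none)], [])
    else
      let tail := pvGoB (s.drop (j.toNat + 1))
      let seg := PySem.Chars.strip (PySem.List.slice s (some ((k : Int) + 1)) (some j))
      (head ++ tail.1, (if seg.isEmpty then [] else [String.ofList seg]) ++ tail.2)
termination_by s.length
decreasing_by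
  have hne : s ≠ [] := by
    intro h; subst h; simp at hk
  have hpos : 0 < s.length := List.length_pos_iff.mpr hne
  simp only [List.length_drop]
  omega

def split_roleplay_bracket_segments_py_alt (text : String) : List String × List String :=
  pvGoB text.toList

-- ===== PRECONDITION & SPEC =====
def Spec_split_roleplay_bracket_segments_py (text : String) (out : List String × List String) : Prop := out = split_roleplay_bracket_segments_py_alt text
instance (text : String) (out : List String × List String) : Decidable (Spec_split_roleplay_bracket_segments_py text out) := by unfold Spec_split_roleplay_bracket_segments_py; infer_instance

-- ===== CLAIM (what is proved, stated in full; the proofs are below) =====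
def Claim_equal_split_roleplay_bracket_segments_py : Prop := ∀ (text : String), Dom_split_roleplay_bracket_segments_py text → Spec_split_roleplay_bracket_segments_py text (split_roleplay_bracket_segments_py text)

-- ===== LEMMAS AND PROOFS =====

-- folding A's step over bracket-free text in the closed state only grows dialogue_buf
theorem pvFoldA_closed (cs : List Char) (dp ins : List String) (dbuf ibuf cl : List Char)
    (h : ∀ c ∈ cs, ¬(c = '[' ∨ c = '{')) :
    cs.foldl pvStepA ⟨dp, ins, dbuf, ibuf, [], cl⟩ = ⟨dp, ins, dbuf ++ cs, ibuf, [], cl⟩ := by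
  induction cs generalizing dbuf with
  | nil => simp
  | cons a t ih =>
    have ha := h a (by simp)
    have hstep : pvStepA ⟨dp, ins, dbuf, ibuf, [], cl⟩ a = ⟨dp, ins, dbuf ++ [a], ibuf, [], cl⟩ := by
      simp [pvStepA, ha]
    rw [List.foldl_cons, hstep, ih _ (fun c hc => h c (List.mem_cons_of_mem _ hc))]
    simp

-- folding A's step over closer-free text in the open state only grows instruction_buf
theorem pvFoldA_open (cs : List Char) (dp ins : List String) (dbuf ibuf : List Char) (op cl : Char)
    (h : ∀ c ∈ cs, c ≠ cl) :
    cs.foldl pvStepA ⟨dp, ins, dbuf, ibuf, [op], [cl]⟩ = ⟨dp, ins, dbuf, ibuf ++ cs, [op], [cl]⟩ := by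
  induction cs generalizing ibuf with
  | nil => simp
  | cons a t ih =>
    have ha : a ≠ cl := h a (by simp)
    have hstep : pvStepA ⟨dp, ins, dbuf, ibuf, [op], [cl]⟩ a = ⟨dp, ins, dbuf, ibuf ++ [a], [op], [cl]⟩ := by
      simp [pvStepA, ha]
    rw [List.foldl_cons, hstep, ih _ (fun c hc => h c (List.mem_cons_of_mem _ hc))]
    simp

-- main invariant: A's fold-and-finish from a clean state equals B's recursion, up to the
-- already-accumulated outputs
-- unfold pvGoB when no bracket occurs
theorem pvGoB_none (s : List Char) (h : s.findIdx? (fun c => c == '[' || c == '{') = none) :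
    pvGoB s = (if s.isEmpty then [] else [String.ofList s], []) := by
  rw [pvGoB.eq_def]
  split
  · rfl
  · simp_all

-- unfold pvGoB at the first bracket
theorem pvGoB_some (s : List Char) (k : Nat) (h : s.findIdx? (fun c => c == '[' || c == '{') = some k) :
    pvGoB s =
      (let head : List String := if k == 0 then [] else [String.ofList (PySem.List.slice s none (some (k : Int)))]
       let c := s.getD k ' '
       let closing : Char := if c = '[' then ']' else '}'
       let j : Int := PySem.Chars.findFrom s [closing] ((k : Int) + 1) none
       if j = -1 then
         (head ++ [String.ofList (PySem.List.slice s (some (k : Int)) none)], [])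
       else
         let tail := pvGoB (s.drop (j.toNat + 1))
         let seg := PySem.Chars.strip (PySem.List.slice s (some ((k : Int) + 1)) (some j))
         (head ++ tail.1, (if seg.isEmpty then [] else [String.ofList seg]) ++ tail.2)) := by
  rw [pvGoB.eq_def]
  split
  · simp_all
  · rename_i k' heq
    rw [h] at heq
    cases heq
    rfl

-- [c] is a prefix of l exactly when l starts with c
theorem pvSingletonPrefix (c : Char) (l : List Char) : ([c] <+: l) ↔ l.head? = some c := by
  cases l <;> simp [List.cons_prefix_cons, eq_comm]

-- main invariant: A's fold-and-finish from a clean state equals B's recursion, up to the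
-- already-accumulated outputs
theorem pvMain (s : List Char) (dp ins : List String) :
    pvFinishA (s.foldl pvStepA ⟨dp, ins, [], [], [], []⟩) =
      (dp ++ (pvGoB s).1, ins ++ (pvGoB s).2) := by
  induction s using pvGoB.induct generalizing dp ins with
  | case1 s hnone =>
    have h : ∀ c ∈ s, ¬(c = '[' ∨ c = '{') := by
      intro c hc
      have := List.findIdx?_eq_none_iff.mp hnone c hc
      simp at this
      tauto
    rw [pvFoldA_closed s dp ins [] [] [] h, pvGoB_none s hnone]
    by_cases hs : s = [] <;> simp [pvFinishA, hs]
  | case2 s k hsome cv clv jv hj =>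
    obtain ⟨hlt, hbr, hmin⟩ := List.findIdx?_eq_some_iff_getElem.mp hsome
    have hbr' : s[k] = '[' ∨ s[k] = '{' := by simpa using hbr
    have hsne : s ≠ [] := by intro h; subst h; simp at hlt
    have htake : ∀ x ∈ s.take k, ¬(x = '[' ∨ x = '{') := by
      intro x hx
      obtain ⟨i, hi, hieq⟩ := List.mem_take_iff_getElem.mp hx
      have := hmin i (by omega)
      subst hieq
      simp at this
      tauto
    have hsplit := (List.take_append_drop k s).symm
    rw [List.drop_eq_getElem_cons hlt] at hsplit
    have hstep : pvStepA ⟨dp, ins, s.take k, [], [], []⟩ s[k] =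
        ⟨dp ++ (if k = 0 then [] else [String.ofList (s.take k)]), ins, [], [],
          [s[k]], [if s[k] = '[' then ']' else '}']⟩ := by
      by_cases hk0 : k = 0
      · subst hk0
        rcases hbr' with hcc | hcc <;> simp [pvStepA, hcc]
      · have hne : s.take k ≠ [] := by simp [List.take_eq_nil_iff]; tauto
        rcases hbr' with hcc | hcc <;> simp [pvStepA, hcc, hne, hk0]
    have hfold : s.foldl pvStepA ⟨dp, ins, [], [], [], []⟩ =
        (s.drop (k+1)).foldl pvStepA ⟨dp ++ (if k = 0 then [] else [String.ofList (s.take k)]),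
          ins, [], [], [s[k]], [if s[k] = '[' then ']' else '}']⟩ := by
      conv_lhs => rw [hsplit]
      rw [List.foldl_append, pvFoldA_closed _ _ _ _ _ _ htake, List.foldl_cons,
          List.nil_append, hstep]
    have hgetD : s.getD k ' ' = s[k] := List.getD_eq_getElem s ' ' hlt
    simp only [jv, clv, cv, hgetD] at hj
    have hj' : PySem.Chars.findFrom s [if s[k] = '[' then ']' else '}'] (((k+1 : Nat) : Int)) none = -1 := by
      push_cast
      simpa using hj
    have hnotin : (if s[k] = '[' then ']' else '}') ∉ s.drop (k+1) := by
      have := (PySem.Chars.findFrom_natCast_eq_neg_one_iff s _ (k+1) (by omega)).mp hj'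
      rw [List.singleton_infix_iff] at this
      exact this
    rw [hfold, pvFoldA_open _ _ _ _ _ _ _ (fun x hx hxe => hnotin (by rwa [hxe] at hx)),
        pvGoB_some s k hsome]
    simp only [hgetD]
    rw [show ((k : Int) + 1) = ((k+1 : Nat) : Int) by push_cast; ring]
    rw [if_pos hj']
    clear hsplit hj
    simp only [pvFinishA, PySem.List.slice_to_natCast, PySem.List.slice_from_natCast]
    rw [show List.drop k s = s[k] :: List.drop (k+1) s from List.drop_eq_getElem_cons hlt]
    simp
    omega
  | case3 s k hsome cv clv jv hj ih =>
    obtain ⟨hlt, hbr, hmin⟩ := List.findIdx?_eq_some_iff_getElem.mp hsome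
    have hbr' : s[k] = '[' ∨ s[k] = '{' := by simpa using hbr
    have hsne : s ≠ [] := by intro h; subst h; simp at hlt
    have htake : ∀ x ∈ s.take k, ¬(x = '[' ∨ x = '{') := by
      intro x hx
      obtain ⟨i, hi, hieq⟩ := List.mem_take_iff_getElem.mp hx
      have := hmin i (by omega)
      subst hieq
      simp at this
      tauto
    have hsplit := (List.take_append_drop k s).symm
    rw [List.drop_eq_getElem_cons hlt] at hsplit
    have hstep : pvStepA ⟨dp, ins, s.take k, [], [], []⟩ s[k] =
        ⟨dp ++ (if k = 0 then [] else [String.ofList (s.take k)]), ins, [], [],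
          [s[k]], [if s[k] = '[' then ']' else '}']⟩ := by
      by_cases hk0 : k = 0
      · subst hk0
        rcases hbr' with hcc | hcc <;> simp [pvStepA, hcc]
      · have hne : s.take k ≠ [] := by simp [List.take_eq_nil_iff]; tauto
        rcases hbr' with hcc | hcc <;> simp [pvStepA, hcc, hne, hk0]
    have hfold : s.foldl pvStepA ⟨dp, ins, [], [], [], []⟩ =
        (s.drop (k+1)).foldl pvStepA ⟨dp ++ (if k = 0 then [] else [String.ofList (s.take k)]),
          ins, [], [], [s[k]], [if s[k] = '[' then ']' else '}']⟩ := by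
      conv_lhs => rw [hsplit]
      rw [List.foldl_append, pvFoldA_closed _ _ _ _ _ _ htake, List.foldl_cons,
          List.nil_append, hstep]
    have hgetD : s.getD k ' ' = s[k] := List.getD_eq_getElem s ' ' hlt
    simp only [jv, clv, cv, hgetD, dite_eq_ite] at hj ih
    rw [show ((k : Int) + 1) = ((k+1 : Nat) : Int) by push_cast; ring] at hj ih
    have hj' : PySem.Chars.findFrom s [if s[k] = '[' then ']' else '}'] (((k+1 : Nat) : Int)) none ≠ -1 := by
      simpa using hj
    obtain ⟨hge, hpre, hminf⟩ := PySem.Chars.findFrom_natCast_spec s _ (k+1) (by omega) hj'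
    set jn := (PySem.Chars.findFrom s [if s[k] = '[' then ']' else '}'] (((k+1 : Nat) : Int)) none).toNat with hjn
    have hm1 : k + 1 ≤ jn := by omega
    have hsm : s[jn]? = some (if s[k] = '[' then ']' else '}') := by
      rw [← List.head?_drop]
      exact (pvSingletonPrefix _ _).mp hpre
    obtain ⟨hmlt, hsmv⟩ := List.getElem?_eq_some_iff.mp hsm
    have hmid : ∀ x ∈ (s.drop (k+1)).take (jn - (k+1)), x ≠ (if s[k] = '[' then ']' else '}') := by
      intro x hx hxe
      obtain ⟨i, hi, hieq⟩ := List.mem_take_iff_getElem.mp hx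
      have hnp := hminf (k+1+i) (by omega) (by simp at hi; omega)
      apply hnp
      rw [pvSingletonPrefix, List.head?_drop]
      have : (List.drop (k+1) s)[i]'(by simp; omega) = s[k+1+i]'(by simp at hi; omega) := by
        rw [List.getElem_drop]
      rw [List.getElem?_eq_some_iff]
      exact ⟨by simp at hi; omega, by rw [← this, hieq, hxe]⟩
    have hdropsplit : s.drop (k+1) = (s.drop (k+1)).take (jn-(k+1)) ++
        (if s[k] = '[' then ']' else '}') :: s.drop (jn+1) := by
      conv_lhs => rw [← List.take_append_drop (jn-(k+1)) (s.drop (k+1))]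
      rw [List.drop_drop, show k+1+(jn-(k+1)) = jn by omega, List.drop_eq_getElem_cons hmlt, hsmv]
    have hstep2 : pvStepA ⟨dp ++ (if k = 0 then [] else [String.ofList (s.take k)]), ins, [],
        (s.drop (k+1)).take (jn-(k+1)), [s[k]], [if s[k] = '[' then ']' else '}']⟩
          (if s[k] = '[' then ']' else '}') =
        ⟨dp ++ (if k = 0 then [] else [String.ofList (s.take k)]),
         (if (PySem.Chars.strip ((s.drop (k+1)).take (jn-(k+1)))).isEmpty then ins
          else ins ++ [String.ofList (PySem.Chars.strip ((s.drop (k+1)).take (jn-(k+1))))]),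
         [], [], [], []⟩ := by
      simp [pvStepA]
    rw [hfold, hdropsplit, List.foldl_append, pvFoldA_open _ _ _ _ _ _ _ hmid,
        List.foldl_cons, List.nil_append, hstep2, ih]
    rw [pvGoB_some s k hsome]
    simp only [hgetD]
    rw [show ((k : Int) + 1) = ((k+1 : Nat) : Int) by push_cast; ring]
    rw [if_neg hj']
    have hslice : PySem.List.slice s (some ((k+1 : Nat) : Int))
        (some (PySem.Chars.findFrom s [if s[k] = '[' then ']' else '}'] (((k+1 : Nat) : Int)) none)) =
        (s.drop (k+1)).take (jn-(k+1)) := by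
      rw [PySem.List.slice_toNat s (by omega) (by omega)]
      simp only [Int.toNat_natCast]
      rw [← hjn]
    rw [hslice,
        show (PySem.Chars.findFrom s [if s[k] = '[' then ']' else '}'] (((k+1 : Nat) : Int)) none).toNat = jn
          from hjn.symm]
    by_cases hseg : (PySem.Chars.strip ((s.drop (k+1)).take (jn-(k+1)))).isEmpty <;>
      simp [hseg, PySem.List.slice_to_natCast]

-- ===== VERDICT (by name: the statement is the Claim_ definition above) =====
theorem split_roleplay_bracket_segments_py_spec : Claim_equal_split_roleplay_bracket_segments_py := by
  intro text _
  unfold Spec_split_roleplay_bracket_segments_py split_roleplay_bracket_segments_py split_roleplay_bracket_segments_py_alt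
  rw [pvMain]
  simp
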